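-- pv_equiv track=rewrite | github.com/DalfonsoLucia/Programmazione-Python-2021 | Lezioni Python/Python_lezione6.py | prendiconsonanti
-- ===== SOURCE A (Python) =====
-- def prendiconsonanti (s):
--     numero_caratteri = 0
--     risultato = ""
--     for lettera in s:
--         if lettera not in "aeiou" and numero_caratteri <= 3:
--             risultato = risultato + lettera
--             numero_caratteri = numero_caratteri + 1
--
--     return risultato
-- ===== SOURCE B (Python) =====
-- def prendiconsonanti(s):
--     # Recursive descent with an explicit budget: skip the vowel run, take one
--     # consonant, recurse with budget-1; stops scanning as soon as 4 are found.
--     def go(i, k):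
--         if k == 0:
--             return ""
--         while i < len(s) and s[i] in "aeiou":
--             i += 1
--         if i == len(s):
--             return ""
--         return s[i] + go(i + 1, k - 1)
--     return go(0, 4)
-- ===== Notes on version B (the rewrite author's own statement) =====
-- stated objective: faster
-- what changed: Replaces the counter-guarded full scan by a budgeted recursion (depth at most 4) that skips each vowel run with an inner loop, emits one consonant per call, and stops scanning entirely once 4 consonants are collected.
import Mathlib
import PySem

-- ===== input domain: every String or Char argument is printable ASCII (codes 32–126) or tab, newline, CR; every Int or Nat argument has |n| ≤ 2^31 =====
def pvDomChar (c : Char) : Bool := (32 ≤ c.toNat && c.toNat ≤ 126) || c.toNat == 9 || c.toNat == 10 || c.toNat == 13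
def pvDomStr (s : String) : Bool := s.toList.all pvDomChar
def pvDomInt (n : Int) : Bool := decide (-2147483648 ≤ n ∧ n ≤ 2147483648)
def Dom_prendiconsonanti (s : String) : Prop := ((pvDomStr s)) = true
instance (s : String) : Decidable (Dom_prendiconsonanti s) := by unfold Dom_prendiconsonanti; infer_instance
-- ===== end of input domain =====

-- B replaces A's counter-guarded full scan by a budgeted recursion (depth ≤ 4) that
-- skips vowel runs and stops scanning once 4 consonants are collected (alternative).
-- ===== PORT A =====
def pvStepA (acc : Int × List Char) (lettera : Char) : Int × List Char :=
  if lettera ∉ "aeiou".toList ∧ acc.1 ≤ 3 then (acc.1 + 1, acc.2 ++ [lettera]) else acc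

def prendiconsonanti (s : String) : String :=
  String.ofList (s.toList.foldl pvStepA (0, [])).2

-- ===== PORT B =====
-- the inner `while i < len(s) and s[i] in "aeiou": i += 1` loop of Source B
def pvSkipVowels : List Char → List Char
  | [] => []
  | c :: l => if c ∈ "aeiou".toList then pvSkipVowels l else c :: l

-- Source B's `go(i, k)` (the suffix s[i:] is passed as a list; recursion on the budget k)
def pvGoB : Nat → List Char → List Char
  | 0, _ => []
  | k + 1, l =>
    match pvSkipVowels l with
    | [] => []
    | c :: l' => c :: pvGoB k l'

def prendiconsonanti_alt (s : String) : String :=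
  String.ofList (pvGoB 4 s.toList)

-- ===== PRECONDITION & SPEC =====
def Spec_prendiconsonanti (s : String) (out : String) : Prop := out = prendiconsonanti_alt s
instance (s : String) (out : String) : Decidable (Spec_prendiconsonanti s out) := by unfold Spec_prendiconsonanti; infer_instance

-- ===== CLAIM (what is proved, stated in full; the proofs are below) =====
def Claim_equal_prendiconsonanti : Prop := ∀ (s : String), Dom_prendiconsonanti s → Spec_prendiconsonanti s (prendiconsonanti s)

-- ===== LEMMAS AND PROOFS =====

-- a saturated counter (> 3) makes every remaining step of A's loop a no-op
theorem pvIdleA (l : List Char) (n : Int) (r : List Char) (hn : 3 < n) :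
    l.foldl pvStepA (n, r) = (n, r) := by
  induction l with
  | nil => rfl
  | cons c l ih =>
    rw [List.foldl_cons]
    have h1 : pvStepA (n, r) c = (n, r) := by
      unfold pvStepA
      rw [if_neg]
      rintro ⟨-, h⟩
      simp only [] at h
      omega
    rw [h1, ih]

-- A's loop steps over leading vowels are identities, so folding over l and over
-- pvSkipVowels l agree
theorem pvFoldSkip (l : List Char) (acc : Int × List Char) :
    l.foldl pvStepA acc = (pvSkipVowels l).foldl pvStepA acc := by
  induction l generalizing acc with
  | nil => rfl
  | cons c l ih =>
    unfold pvSkipVowels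
    by_cases hv : c ∈ "aeiou".toList
    · rw [if_pos hv, List.foldl_cons]
      have h1 : pvStepA acc c = acc := by
        unfold pvStepA
        rw [if_neg]
        rintro ⟨h, -⟩
        exact h hv
      rw [h1, ih]
    · rw [if_neg hv]

theorem pvSkipHead (l : List Char) (c : Char) (l' : List Char)
    (h : pvSkipVowels l = c :: l') : c ∉ "aeiou".toList := by
  induction l with
  | nil => simp [pvSkipVowels] at h
  | cons d l ih =>
    unfold pvSkipVowels at h
    by_cases hv : d ∈ "aeiou".toList
    · rw [if_pos hv] at h; exact ih h
    · rw [if_neg hv] at h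
      injection h with h1 h2
      subst h1
      exact hv

-- main correspondence: A's loop with counter 4 - k produces r ++ pvGoB k l
theorem pvMain (k : Nat) (l r : List Char) (hk : k ≤ 4) :
    (l.foldl pvStepA ((4 - (k : Int)), r)).2 = r ++ pvGoB k l := by
  induction k generalizing l r with
  | zero =>
    rw [pvGoB]
    have := pvIdleA l (4 - ((0 : Nat) : Int)) r (by norm_num)
    rw [this]
    simp
  | succ k ih =>
    rw [pvFoldSkip]
    rcases hl : pvSkipVowels l with _ | ⟨c, l'⟩
    · simp [pvGoB, hl]
    · have hc : c ∉ "aeiou".toList := pvSkipHead l c l' hl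
      rw [pvGoB, hl, List.foldl_cons]
      have h1 : pvStepA ((4 - ((k + 1 : Nat) : Int)), r) c
          = ((4 - ((k : Nat) : Int)), r ++ [c]) := by
        unfold pvStepA
        rw [if_pos ⟨hc, by push_cast; omega⟩]
        congr 1
        push_cast; omega
      rw [h1, ih l' (r ++ [c]) (by omega), List.append_assoc]
      simp

-- ===== VERDICT (by name: the statement is the Claim_ definition above) =====
theorem prendiconsonanti_spec : Claim_equal_prendiconsonanti := by
  intro s _
  unfold Spec_prendiconsonanti prendiconsonanti prendiconsonanti_alt
  have h := pvMain 4 s.toList [] (by norm_num)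
  norm_num at h
  rw [h]
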